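-- pv_equiv track=rewrite | github.com/marcosd4h/DeepExtractRuntime | helpers/unified_search.py | _extract_literal_prefix
-- ===== SOURCE A (Python) =====
-- from typing import Any, Optional
--
-- _REGEX_SPECIAL = frozenset(r'\.[]{}()*+?|^$')
--
-- def _extract_literal_prefix(pattern: str) -> Optional[str]:
--     """Return a literal safe for regex prefiltering, or ``None``.
--
--     The returned string is used as a mandatory SQL ``LIKE`` prefilter before
--     running the full regex in Python, so correctness matters more than
--     aggressiveness.  Only plain-literal regexes (optionally wrapped in ``^``
--     / ``$`` anchors and escaped literal punctuation) are eligible.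
--     """
--     if not pattern:
--         return None
--
--     candidate = pattern
--     if candidate.startswith("^"):
--         candidate = candidate[1:]
--     if candidate.endswith("$"):
--         candidate = candidate[:-1]
--     if not candidate:
--         return None
--
--     literal: list[str] = []
--     i = 0
--     while i < len(candidate):
--         ch = candidate[i]
--         if ch == "\\":
--             if i + 1 >= len(candidate):
--                 return None
--             next_ch = candidate[i + 1]
--             if next_ch in _REGEX_SPECIAL or next_ch == "\\":
--                 literal.append(next_ch)
--                 i += 2
--                 continue
--             return None
--         if ch in _REGEX_SPECIAL:
--             return None
--         literal.append(ch)
--         i += 1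
--
--     extracted = "".join(literal)
--     if len(extracted) < 3:
--         return None
--     return extracted
-- ===== SOURCE B (Python) =====
-- from typing import Any, Optional
--
-- _REGEX_SPECIAL = frozenset(r'\.[]{}()*+?|^$')
--
-- def _extract_literal_prefix(pattern: str) -> Optional[str]:
--     """Split-based reimplementation: cut the candidate at backslashes and
--     reason about runs of separators instead of stepping an index."""
--     if not pattern:
--         return None
--     candidate = pattern
--     if candidate.startswith("^"):
--         candidate = candidate[1:]
--     if candidate.endswith("$"):
--         candidate = candidate[:-1]
--     if not candidate:
--         return None
--
--     parts = candidate.split("\\")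
--     if any(c in _REGEX_SPECIAL for c in parts[0]):
--         return None
--     pieces = [parts[0]]
--     run = 0  # backslash separators seen since the last non-empty part
--     for p in parts[1:]:
--         run += 1
--         if p == "":
--             continue
--         pieces.append("\\" * (run // 2))
--         if run % 2 == 1:
--             if p[0] not in _REGEX_SPECIAL:
--                 return None
--             head, body = p[0], p[1:]
--         else:
--             head, body = "", p
--         if any(c in _REGEX_SPECIAL for c in body):
--             return None
--         pieces.append(head + body)
--         run = 0
--     if run % 2 == 1:
--         return None
--     pieces.append("\\" * (run // 2))
--     extracted = "".join(pieces)
--     return extracted if len(extracted) >= 3 else None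
-- ===== Notes on version B (the rewrite author's own statement) =====
-- stated objective: faster
-- what changed: Replaces A's index-stepping escape loop (consuming one or two characters at a time) by splitting the candidate at backslashes once and processing the parts, deciding each escape from the parity of the run of separator backslashes before a non-empty part.
import Mathlib
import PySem

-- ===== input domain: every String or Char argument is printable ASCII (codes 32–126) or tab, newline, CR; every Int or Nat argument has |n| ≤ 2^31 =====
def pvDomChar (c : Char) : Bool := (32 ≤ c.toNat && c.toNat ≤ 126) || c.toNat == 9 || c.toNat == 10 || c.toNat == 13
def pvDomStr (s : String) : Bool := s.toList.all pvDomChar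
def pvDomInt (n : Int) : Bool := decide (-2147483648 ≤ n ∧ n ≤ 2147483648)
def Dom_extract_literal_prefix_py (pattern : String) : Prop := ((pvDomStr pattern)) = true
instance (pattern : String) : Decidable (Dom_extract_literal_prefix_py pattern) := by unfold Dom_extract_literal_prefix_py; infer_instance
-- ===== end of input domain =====

-- B replaces A's index-stepping escape loop by splitting the candidate at backslashes and
-- reasoning about runs of separators (objective: faster by a constant factor, measured).

-- ===== PORT A =====
-- membership in _REGEX_SPECIAL (the 14 regex metacharacters, backslash included)
def pvSpecial (c : Char) : Bool :=
  ['\\', '.', '[', ']', '{', '}', '(', ')', '*', '+', '?', '|', '^', '$'].contains c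

-- A's while-loop: the index i becomes the remaining suffix, `literal` the mapped-in prefix
def pvGoA : List Char → Option (List Char)
  | [] => some []
  | c :: rest =>
    if c = '\\' then
      match rest with
      | [] => none
      | c2 :: rest2 =>
        if pvSpecial c2 || c2 = '\\' then (pvGoA rest2).map (c2 :: ·) else none
    else if pvSpecial c then none
    else (pvGoA rest).map (c :: ·)

def extract_literal_prefix_py (pattern : String) : Option String :=
  let l := pattern.toList
  if l = [] then none
  else
    let c1 := if l.head? = some '^' then l.drop 1 else l        -- candidate[1:] after startswith "^"
    let c2 := if c1.getLast? = some '$' then c1.dropLast else c1 -- candidate[:-1] after endswith "$"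
    if c2 = [] then none
    else
      match pvGoA c2 with
      | none => none
      | some lit => if lit.length < 3 then none else some (String.ofList lit)

-- ===== PORT B =====
-- exact port of candidate.split("\\") (single-character separator)
def pvSplitBS : List Char → List (List Char)
  | [] => [[]]
  | c :: rest =>
    if c = '\\' then [] :: pvSplitBS rest
    else
      match pvSplitBS rest with
      | [] => [[c]]            -- unreachable: pvSplitBS never returns []
      | p :: ps => (c :: p) :: ps

-- B's for-loop over parts[1:], carrying the run of backslash separators
def pvGoB : Nat → List (List Char) → Option (List Char)
  | run, [] => if run % 2 = 1 then none else some (List.replicate (run / 2) '\\')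
  | run, p :: ps =>
    let r := run + 1
    match p with
    | [] => pvGoB r ps
    | c :: body =>
      if r % 2 = 1 then
        if pvSpecial c then
          if body.any pvSpecial then none
          else (pvGoB 0 ps).map (fun t => List.replicate (r / 2) '\\' ++ (c :: body) ++ t)
        else none
      else
        if (c :: body).any pvSpecial then none
        else (pvGoB 0 ps).map (fun t => List.replicate (r / 2) '\\' ++ (c :: body) ++ t)

def extract_literal_prefix_py_alt (pattern : String) : Option String :=
  let l := pattern.toList
  if l = [] then none
  else
    let c1 := if l.head? = some '^' then l.drop 1 else l
    let c2 := if c1.getLast? = some '$' then c1.dropLast else c1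
    if c2 = [] then none
    else
      match pvSplitBS c2 with
      | [] => none             -- unreachable
      | p0 :: ps =>
        if p0.any pvSpecial then none
        else
          match pvGoB 0 ps with
          | none => none
          | some t =>
            let extracted := p0 ++ t
            if 3 ≤ extracted.length then some (String.ofList extracted) else none

-- ===== PRECONDITION & SPEC =====
def Spec_extract_literal_prefix_py (pattern : String) (out : Option String) : Prop := out = extract_literal_prefix_py_alt pattern
instance (pattern : String) (out : Option String) : Decidable (Spec_extract_literal_prefix_py pattern out) := by unfold Spec_extract_literal_prefix_py; infer_instance

-- ===== CLAIM (what is proved, stated in full; the proofs are below) =====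
def Claim_equal_extract_literal_prefix_py : Prop := ∀ (pattern : String), Dom_extract_literal_prefix_py pattern → Spec_extract_literal_prefix_py pattern (extract_literal_prefix_py pattern)

-- ===== LEMMAS AND PROOFS =====

-- rejoin the tail parts, each preceded by its separator backslash
def pvJ (ps : List (List Char)) : List Char := (ps.map (fun p => '\\' :: p)).flatten

theorem pvSpecial_bs : pvSpecial '\\' = true := by decide

theorem pvSplit_ne_nil : ∀ l, pvSplitBS l ≠ [] := by
  intro l; induction l with
  | nil => simp [pvSplitBS]
  | cons c rest ih =>
    simp only [pvSplitBS]
    split_ifs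
    · simp
    · cases h : pvSplitBS rest <;> simp

theorem pvSplit_no_bs : ∀ l p, p ∈ pvSplitBS l → '\\' ∉ p := by
  intro l
  induction l with
  | nil =>
    intro p hp
    simp [pvSplitBS] at hp
    simp [hp]
  | cons c rest ih =>
    intro p hp
    by_cases hc : c = '\\'
    · simp only [pvSplitBS, if_pos hc] at hp
      rcases List.mem_cons.mp hp with h | h
      · simp [h]
      · exact ih p h
    · cases h' : pvSplitBS rest with
      | nil => exact absurd h' (pvSplit_ne_nil rest)
      | cons q qs =>
        simp only [pvSplitBS, if_neg hc, h'] at hp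
        rcases List.mem_cons.mp hp with h | h
        · subst h
          intro hm
          rcases List.mem_cons.mp hm with h1 | h1
          · exact hc h1.symm
          · exact ih q (by rw [h']; exact List.mem_cons_self) h1
        · exact ih p (by rw [h']; exact List.mem_cons_of_mem _ h)

theorem pvSplit_recon : ∀ l p0 ps, pvSplitBS l = p0 :: ps → l = p0 ++ pvJ ps := by
  intro l
  induction l with
  | nil =>
    intro p0 ps h
    simp only [pvSplitBS] at h
    injection h with h1 h2
    simp [← h1, ← h2, pvJ]
  | cons c rest ih =>
    intro p0 ps h
    cases h' : pvSplitBS rest with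
    | nil => exact absurd h' (pvSplit_ne_nil rest)
    | cons q qs =>
      by_cases hc : c = '\\'
      · simp only [pvSplitBS, if_pos hc, h'] at h
        injection h with h1 h2
        have hr := ih q qs h'
        subst hc
        simp [← h1, ← h2, pvJ, hr]
      · simp only [pvSplitBS, if_neg hc, h'] at h
        injection h with h1 h2
        have hr := ih q qs h'
        simp [← h1, ← h2, hr]

-- A's loop on a backslash-free block: literal copy unless a special occurs
theorem pvGoA_plain : ∀ (p t : List Char), '\\' ∉ p →
    pvGoA (p ++ t) = if p.any pvSpecial then none else (pvGoA t).map (p ++ ·) := by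
  intro p
  induction p with
  | nil => intro t _; simp
  | cons c p' ih =>
    intro t hnb
    have hc : ¬ c = '\\' := fun h => hnb (by simp [h])
    have hp' : '\\' ∉ p' := fun h => hnb (by simp [h])
    simp only [List.cons_append]
    rw [pvGoA.eq_def]
    by_cases hs : pvSpecial c
    · simp [hc, hs]
    · by_cases ha : p'.any pvSpecial
      · simp [hc, hs, ih t hp', ha]
      · cases ht : pvGoA t <;> simp [hc, hs, ih t hp', ha, ht]

-- A's loop on r pending backslashes at the end of input
theorem pvGoA_bs_end : ∀ r, pvGoA (List.replicate r '\\') =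
    if r % 2 = 1 then none else some (List.replicate (r / 2) '\\') := by
  intro r
  induction r using Nat.strong_induction_on with
  | _ r ih =>
    match r with
    | 0 => simp [pvGoA]
    | 1 => rw [show List.replicate 1 '\\' = ['\\'] by simp, pvGoA.eq_def]; simp
    | (n + 2) =>
      have h2 : List.replicate (n + 2) '\\' = '\\' :: '\\' :: List.replicate n '\\' := by
        simp [List.replicate]
      have hm : (n + 2) % 2 = n % 2 := by omega
      have hd : (n + 2) / 2 = n / 2 + 1 := by omega
      rw [h2, pvGoA.eq_def]
      by_cases hp : n % 2 = 1
      · simp [pvSpecial_bs, ih n (by omega), hm, hp]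
      · simp [pvSpecial_bs, ih n (by omega), hm, hd, hp, List.replicate]

-- A's loop on r pending backslashes followed by a non-backslash character
theorem pvGoA_bs_cons : ∀ r (c : Char) t, ¬ c = '\\' →
    pvGoA (List.replicate r '\\' ++ c :: t) =
      if r % 2 = 1 then
        (if pvSpecial c then (pvGoA t).map (fun x => List.replicate (r / 2) '\\' ++ c :: x) else none)
      else
        (if pvSpecial c then none else (pvGoA t).map (fun x => List.replicate (r / 2) '\\' ++ c :: x)) := by
  intro r
  induction r using Nat.strong_induction_on with
  | _ r ih =>
    match r with
    | 0 =>
      intro c t hc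
      rw [show List.replicate 0 '\\' ++ c :: t = c :: t by simp, pvGoA.eq_def]
      by_cases hs : pvSpecial c
      · simp [hc, hs]
      · cases ht : pvGoA t <;> simp [hc, hs, ht]
    | 1 =>
      intro c t hc
      rw [show List.replicate 1 '\\' ++ c :: t = '\\' :: c :: t by simp [List.replicate], pvGoA.eq_def]
      by_cases hs : pvSpecial c
      · cases ht : pvGoA t <;> simp [hc, hs, ht, List.replicate]
      · simp [hc, hs]
    | (n + 2) =>
      intro c t hc
      have h2 : List.replicate (n + 2) '\\' ++ c :: t
          = '\\' :: '\\' :: (List.replicate n '\\' ++ c :: t) := by simp [List.replicate]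
      have hm : (n + 2) % 2 = n % 2 := by omega
      have hd : (n + 2) / 2 = n / 2 + 1 := by omega
      have hrec := ih n (by omega) c t hc
      rw [h2, pvGoA.eq_def]
      by_cases hp : n % 2 = 1 <;> by_cases hs : pvSpecial c <;>
        cases ht : pvGoA t <;>
        simp [pvSpecial_bs, hrec, hm, hd, hp, hs, ht, List.replicate]

-- the core correspondence: A's loop over the rejoined tail equals B's loop over the parts
theorem pvGoA_eq_goB : ∀ (ps : List (List Char)) (run : Nat), (∀ p ∈ ps, '\\' ∉ p) →
    pvGoA (List.replicate run '\\' ++ pvJ ps) = pvGoB run ps := by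
  intro ps
  induction ps with
  | nil => intro run _; simp [pvJ, pvGoB, pvGoA_bs_end]
  | cons p ps ih =>
    intro run hnb
    have hpn : '\\' ∉ p := hnb p (by simp)
    have hps : ∀ q ∈ ps, '\\' ∉ q := fun q hq => hnb q (by simp [hq])
    match p with
    | [] =>
      have harr : List.replicate run '\\' ++ pvJ ([] :: ps)
          = List.replicate (run + 1) '\\' ++ pvJ ps := by
        simp [pvJ, List.replicate_succ' (n := run)]
      rw [harr, ih (run + 1) hps]
      simp [pvGoB]
    | c :: body =>
      have hcb : ¬ c = '\\' := fun h => hpn (by simp [h])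
      have hbnb : '\\' ∉ body := fun h => hpn (by simp [h])
      have harr : List.replicate run '\\' ++ pvJ ((c :: body) :: ps)
          = List.replicate (run + 1) '\\' ++ c :: (body ++ pvJ ps) := by
        simp [pvJ, List.replicate_succ' (n := run)]
      have ih0 : pvGoA (pvJ ps) = pvGoB 0 ps := by
        have h := ih 0 hps; simpa using h
      rw [harr, pvGoA_bs_cons (run + 1) c _ hcb,
          pvGoA_plain body (pvJ ps) hbnb, ih0]
      by_cases hp : (run + 1) % 2 = 1 <;> by_cases hs : pvSpecial c <;>
        by_cases hb : body.any pvSpecial <;>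
        cases hg : pvGoB 0 ps <;>
        simp [pvGoB, hp, hs, hb, hg]

-- the two final stages agree for any candidate list
theorem pvCore (c2 : List Char) :
    (match pvGoA c2 with
      | none => none
      | some lit => if lit.length < 3 then none else some (String.ofList lit)) =
    (match pvSplitBS c2 with
      | [] => none
      | p0 :: ps =>
        if p0.any pvSpecial then none
        else
          match pvGoB 0 ps with
          | none => none
          | some t =>
            if 3 ≤ (p0 ++ t).length then some (String.ofList (p0 ++ t)) else none) := by
  cases hsp : pvSplitBS c2 with
  | nil => exact absurd hsp (pvSplit_ne_nil c2)
  | cons p0 ps =>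
    have hrec := pvSplit_recon c2 p0 ps hsp
    have hnb0 : '\\' ∉ p0 := pvSplit_no_bs c2 p0 (by simp [hsp])
    have hnbs : ∀ q ∈ ps, '\\' ∉ q := fun q hq => pvSplit_no_bs c2 q (by simp [hsp, hq])
    have hA : pvGoA c2 = if p0.any pvSpecial then none else (pvGoB 0 ps).map (p0 ++ ·) := by
      rw [hrec, pvGoA_plain p0 (pvJ ps) hnb0]
      rw [show pvJ ps = List.replicate 0 '\\' ++ pvJ ps by simp, pvGoA_eq_goB ps 0 hnbs]
    rw [hA]
    by_cases h0 : p0.any pvSpecial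
    · simp [h0]
    · cases hg : pvGoB 0 ps with
      | none => simp [h0, hg]
      | some t =>
        simp only [h0, hg, Bool.false_eq_true, if_false, Option.map_some, List.length_append]
        split_ifs <;> first | rfl | omega

-- ===== VERDICT (by name: the statement is the Claim_ definition above) =====
theorem extract_literal_prefix_py_spec : Claim_equal_extract_literal_prefix_py := by
  intro pattern _
  unfold Spec_extract_literal_prefix_py extract_literal_prefix_py extract_literal_prefix_py_alt
  simp only []
  split_ifs <;> first | rfl | exact pvCore _
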